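-- pv_equiv track=rewrite | github.com/benquick123/code-profiling | code/batch-1/vse-naloge-brez-testov/DN6-M-232.py | izlociBesedoZPredznakom
-- ===== SOURCE A (Python) =====
-- def izlociBesedoZPredznakom(besedilo,predznak):
--     afne = []
--     beseda = ""
--     while len(besedilo)>0:
--
--         if besedilo[0] == predznak:
--             i = 1
--             while besedilo[i].isalnum() and i+1 < len(besedilo):
--                 i = i+1
--             if( i+1 == len(besedilo)):
--                 afne.append(besedilo[1:i+1])
--             else:
--                 afne.append(besedilo[1:i])
--             besedilo = besedilo[i:]
--         else:
--             besedilo = besedilo[1:]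
--     return afne
-- ===== SOURCE B (Python) =====
-- # Single forward index scan over the original string (no repeated slicing): O(n) instead of A's O(n^2).
-- def izlociBesedoZPredznakom(besedilo, predznak):
--     afne = []
--     n = len(besedilo)
--     i = 0
--     while i < n:
--         if besedilo[i] == predznak:
--             j = i + 1
--             while j < n and besedilo[j].isalnum():
--                 j += 1
--             afne.append(besedilo[i+1:j])
--             i = j
--         else:
--             i += 1
--     return afne
-- ===== Notes on version B (the rewrite author's own statement) =====
-- stated objective: faster
-- what changed: B replaces A's outer loop that re-slices the string (besedilo = besedilo[1:] / besedilo[i:], a fresh copy per step) by a single forward index scan over the original string, slicing each word out once.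
-- intended difference: On texts whose last character is non-alphanumeric and immediately preceded by a prefix-signed word, A's 'i+1 == len' branch appends that trailing non-word character to the last extracted word (A('#ab!','#') = ['ab!']); B returns the word alone (['ab']), which is the intended value. — e.g. on izlociBesedoZPredznakom("#ab!", "#"): A returns ["ab!"], B returns ["ab"]
-- outside the precondition, e.g. on izlociBesedoZPredznakom('a#', '#'): A raises IndexError, B returns ['']
import Mathlib
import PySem

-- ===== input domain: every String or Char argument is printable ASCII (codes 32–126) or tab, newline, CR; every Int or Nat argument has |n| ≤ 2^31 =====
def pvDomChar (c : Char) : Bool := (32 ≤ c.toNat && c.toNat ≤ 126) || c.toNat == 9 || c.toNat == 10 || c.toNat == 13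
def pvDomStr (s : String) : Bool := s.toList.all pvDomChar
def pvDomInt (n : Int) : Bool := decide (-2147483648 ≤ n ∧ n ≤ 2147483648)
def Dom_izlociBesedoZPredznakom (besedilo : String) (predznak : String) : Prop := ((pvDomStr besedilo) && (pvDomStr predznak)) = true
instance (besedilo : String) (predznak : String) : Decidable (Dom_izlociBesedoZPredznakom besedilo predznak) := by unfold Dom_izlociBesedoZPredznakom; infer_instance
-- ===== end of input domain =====

-- B replaces A's repeated string slicing (a fresh suffix copy per step) by a single forward
-- index scan over the original string; return value only, no argument is mutated.
-- Loops are ported as structural recursion on a fuel argument initialised to the string length,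
-- which each loop can never exhaust (a totality device only; proved sufficient in the lemmas).

-- ===== PORT A =====
-- inner `while besedilo[i].isalnum() and i+1 < len(besedilo)` loop of A.
-- Python indexes `besedilo[i]`; the index is out of range only when len(besedilo) = 1 and i = 1,
-- where Python raises IndexError — exactly the inputs Pre_ excludes — so `getD` is exact on Pre_.
def pvStopA (t : List Char) (i : Nat) : Nat → Nat
  | fuel + 1 =>
    if PySem.Chars.isalnum (t.getD i ' ') = true ∧ i + 1 < t.length then
      pvStopA t (i + 1) fuel
    else i
  | 0 => i

-- outer `while len(besedilo) > 0` loop of A; slices besedilo[1:i+1] / besedilo[1:i] / besedilo[i:]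
-- are (drop 1).take i / (drop 1).take (i-1) / drop i (= PySem.List.slice with these Nat bounds).
def pvRunA (p : List Char) (s : List Char) : Nat → List (List Char)
  | fuel + 1 =>
    match s with
    | [] => []
    | c :: rest =>
      if [c] = p then
        (if pvStopA (c :: rest) 1 (c :: rest).length + 1 = (c :: rest).length then
           ((c :: rest).drop 1).take (pvStopA (c :: rest) 1 (c :: rest).length)
         else
           ((c :: rest).drop 1).take (pvStopA (c :: rest) 1 (c :: rest).length - 1))
        :: pvRunA p ((c :: rest).drop (pvStopA (c :: rest) 1 (c :: rest).length)) fuel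
      else pvRunA p rest fuel
  | 0 => []

def izlociBesedoZPredznakom (besedilo : String) (predznak : String) : List String :=
  (pvRunA predznak.toList besedilo.toList besedilo.toList.length).map (fun w => String.ofList w)

-- ===== PORT B =====
-- inner `while j < n and besedilo[j].isalnum()` loop of B
def pvFindB (s : List Char) (j : Nat) : Nat → Nat
  | fuel + 1 =>
    if j < s.length ∧ PySem.Chars.isalnum (s.getD j ' ') = true then
      pvFindB s (j + 1) fuel
    else j
  | 0 => j

-- outer `while i < n` loop of B; the slice besedilo[i+1:j] is (drop (i+1)).take (j-(i+1)).
def pvScanB (p : List Char) (s : List Char) (i : Nat) : Nat → List (List Char)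
  | fuel + 1 =>
    if i < s.length then
      if [s.getD i ' '] = p then
        ((s.drop (i + 1)).take (pvFindB s (i + 1) s.length - (i + 1)))
          :: pvScanB p s (pvFindB s (i + 1) s.length) fuel
      else pvScanB p s (i + 1) fuel
    else []
  | 0 => []

def izlociBesedoZPredznakom_alt (besedilo : String) (predznak : String) : List String :=
  (pvScanB predznak.toList besedilo.toList 0 besedilo.toList.length).map (fun w => String.ofList w)

-- ===== PRECONDITION & SPEC =====
-- list-level forms of the precondition and the change region (used by Pre_/D_ below)
def pvPreL (p s : List Char) : Prop :=
  ¬ (p.length = 1 ∧ s ≠ [] ∧ s.getLast? = p[0]?)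

def pvDL (p s : List Char) : Prop :=
  p.length = 1 ∧ s ≠ [] ∧ s[s.length - 1]?.any PySem.Chars.isalnum = false ∧
  ∃ q < s.length - 1, s[q]? = p[0]? ∧
    ∀ m < s.length - 1, q < m → s[m]?.any PySem.Chars.isalnum = true

-- Pre_ excludes exactly the inputs where A raises IndexError: a one-character sign string that is
-- also the last character of the text (the scan then indexes besedilo[1] in a length-1 string).
def Pre_izlociBesedoZPredznakom (besedilo : String) (predznak : String) : Prop :=
  pvPreL predznak.toList besedilo.toList
instance (besedilo : String) (predznak : String) : Decidable (Pre_izlociBesedoZPredznakom besedilo predznak) := by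
  unfold Pre_izlociBesedoZPredznakom pvPreL; infer_instance

def pvWitness_izlociBesedoZPredznakom : String × String := ("x #abc, #de y", "#")

-- On texts whose last character is non-alphanumeric and is immediately preceded by a signed word,
-- A's `i+1 == len` branch appends that trailing non-word character to the extracted word
-- (A("#ab!","#") = ["ab!"]) while B returns the word alone (["ab"]), which is the intended value.
def D_izlociBesedoZPredznakom (besedilo : String) (predznak : String) : Prop :=
  pvDL predznak.toList besedilo.toList
instance (besedilo : String) (predznak : String) : Decidable (D_izlociBesedoZPredznakom besedilo predznak) := by
  unfold D_izlociBesedoZPredznakom pvDL; infer_instance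

def Spec_izlociBesedoZPredznakom (besedilo : String) (predznak : String) (out : List String) : Prop :=
  ¬ D_izlociBesedoZPredznakom besedilo predznak → out = izlociBesedoZPredznakom_alt besedilo predznak
instance (besedilo : String) (predznak : String) (out : List String) : Decidable (Spec_izlociBesedoZPredznakom besedilo predznak out) := by
  unfold Spec_izlociBesedoZPredznakom; infer_instance

def pvDiffWitness_izlociBesedoZPredznakom : String × String := ("#ab!", "#")
def pvDiffWitnessOut_izlociBesedoZPredznakom : (List String) × (List String) := (["ab!"], ["ab"])

-- ===== CLAIM (what is proved, stated in full; the proofs are below) =====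
def Claim_unchanged_izlociBesedoZPredznakom : Prop := ∀ (besedilo : String) (predznak : String), Dom_izlociBesedoZPredznakom besedilo predznak → Pre_izlociBesedoZPredznakom besedilo predznak → Spec_izlociBesedoZPredznakom besedilo predznak (izlociBesedoZPredznakom besedilo predznak)
def Claim_changed_izlociBesedoZPredznakom : Prop := Dom_izlociBesedoZPredznakom (pvDiffWitness_izlociBesedoZPredznakom.1) (pvDiffWitness_izlociBesedoZPredznakom.2) ∧ Pre_izlociBesedoZPredznakom (pvDiffWitness_izlociBesedoZPredznakom.1) (pvDiffWitness_izlociBesedoZPredznakom.2) ∧ D_izlociBesedoZPredznakom (pvDiffWitness_izlociBesedoZPredznakom.1) (pvDiffWitness_izlociBesedoZPredznakom.2) ∧ izlociBesedoZPredznakom (pvDiffWitness_izlociBesedoZPredznakom.1) (pvDiffWitness_izlociBesedoZPredznakom.2) = pvDiffWitnessOut_izlociBesedoZPredznakom.1 ∧ izlociBesedoZPredznakom_alt (pvDiffWitness_izlociBesedoZPredznakom.1) (pvDiffWitness_izlociBesedoZPredznakom.2) = pvDiffWitnessOut_izlociBesedoZPredznakom.2 ∧ pvDiffWitnessOut_izlociBesedoZPredznakom.1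 ≠ pvDiffWitnessOut_izlociBesedoZPredznakom.2
def Claim_exact_izlociBesedoZPredznakom : Prop := ∀ (besedilo : String) (predznak : String), Dom_izlociBesedoZPredznakom besedilo predznak → Pre_izlociBesedoZPredznakom besedilo predznak → D_izlociBesedoZPredznakom besedilo predznak → izlociBesedoZPredznakom besedilo predznak ≠ izlociBesedoZPredznakom_alt besedilo predznak

-- ===== LEMMAS AND PROOFS =====

theorem pvFindB_ge (s : List Char) (j fuel : Nat) : j ≤ pvFindB s j fuel := by
  induction fuel generalizing j with
  | zero => simp [pvFindB]
  | succ fuel ih =>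
    rw [pvFindB]; split
    · exact Nat.le_trans (Nat.le_succ j) (ih (j + 1))
    · exact Nat.le_refl j

theorem pvFindB_le (s : List Char) (j fuel : Nat) (h : j ≤ s.length) : pvFindB s j fuel ≤ s.length := by
  induction fuel generalizing j with
  | zero => simpa [pvFindB]
  | succ fuel ih =>
    rw [pvFindB]; split
    · next hc => exact ih (j + 1) hc.1
    · exact h

theorem pvFindB_not_alnum (s : List Char) (j fuel : Nat) (hfuel : s.length - j ≤ fuel)
    (h : pvFindB s j fuel < s.length) :
    PySem.Chars.isalnum (s.getD (pvFindB s j fuel) ' ') = false := by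
  induction fuel generalizing j with
  | zero =>
    simp only [pvFindB] at h ⊢
    omega
  | succ fuel ih =>
    rw [pvFindB] at h ⊢
    split at h
    · next hc =>
      simp only [hc]
      exact ih (j + 1) (by omega) h
    · next hc =>
      simp only [hc, if_false]
      rcases Decidable.not_and_iff_not_or_not.mp hc with h1 | h2
      · omega
      · simpa using h2

theorem pvFindB_run (s : List Char) (j fuel : Nat) :
    ∀ m, j ≤ m → m < pvFindB s j fuel → PySem.Chars.isalnum (s.getD m ' ') = true := by
  induction fuel generalizing j with
  | zero => intro m h1 h2; simp [pvFindB] at h2; omega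
  | succ fuel ih =>
    intro m h1 h2
    rw [pvFindB] at h2
    split at h2
    · next hc =>
      rcases Nat.eq_or_lt_of_le h1 with rfl | hlt
      · exact hc.2
      · exact ih (j + 1) m hlt h2
    · omega

theorem pvGetD_drop (s : List Char) (i k : Nat) (d : Char) :
    (s.drop i).getD k d = s.getD (i + k) d := by
  simp [List.getD_eq_getElem?_getD, List.getElem?_drop]

theorem pvRunA_nil (p : List Char) (f : Nat) : pvRunA p [] f = [] := by
  cases f <;> simp [pvRunA]

theorem pvScanB_ge (p s : List Char) (i fb : Nat) (h : s.length ≤ i) : pvScanB p s i fb = [] := by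
  cases fb with
  | zero => simp [pvScanB]
  | succ fb => rw [pvScanB, if_neg (by omega)]

theorem pvAny_getD (s : List Char) (i : Nat) (h : i < s.length) (f : Char → Bool) :
    s[i]?.any f = f (s.getD i ' ') := by
  rw [List.getElem?_eq_getElem h, List.getD_eq_getElem s ' ' h]
  rfl

theorem pvOptEq_getD (p s : List Char) (i : Nat) (hi : i < s.length) (hp : p.length = 1) :
    (s[i]? = p[0]?) ↔ s.getD i ' ' = p.getD 0 ' ' := by
  rw [List.getElem?_eq_getElem hi, List.getElem?_eq_getElem (by omega),
    List.getD_eq_getElem s ' ' hi, List.getD_eq_getElem p ' ' (by omega)]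
  exact ⟨fun h => Option.some.inj h, fun h => by rw [h]⟩

theorem pvPreL_iff (p s : List Char) :
    pvPreL p s ↔
      ¬ (p.length = 1 ∧ 1 ≤ s.length ∧ s.getD (s.length - 1) ' ' = p.getD 0 ' ') := by
  unfold pvPreL
  refine not_congr (and_congr_right fun hp => ?_)
  constructor
  · rintro ⟨h2, h3⟩
    have hn : 1 ≤ s.length := List.length_pos_iff.mpr h2
    rw [List.getLast?_eq_getElem?, pvOptEq_getD p s (s.length - 1) (by omega) hp] at h3
    exact ⟨hn, h3⟩
  · rintro ⟨hn, h3⟩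
    have h2 : s ≠ [] := List.length_pos_iff.mp (by omega)
    rw [List.getLast?_eq_getElem?, pvOptEq_getD p s (s.length - 1) (by omega) hp]
    exact ⟨h2, h3⟩

theorem pvDL_iff (p s : List Char) :
    pvDL p s ↔
      (p.length = 1 ∧ 1 ≤ s.length ∧
        PySem.Chars.isalnum (s.getD (s.length - 1) ' ') = false ∧
        ∃ q < s.length - 1, s.getD q ' ' = p.getD 0 ' ' ∧
          ∀ m < s.length - 1, q < m → PySem.Chars.isalnum (s.getD m ' ') = true) := by
  unfold pvDL
  refine and_congr_right fun hp => ?_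
  constructor
  · rintro ⟨h2, h3, q, hq, h4, h5⟩
    have hn : 1 ≤ s.length := List.length_pos_iff.mpr h2
    rw [pvAny_getD s (s.length - 1) (by omega)] at h3
    rw [pvOptEq_getD p s q (by omega) hp] at h4
    exact ⟨hn, h3, q, hq, h4, fun m hm1 hm2 => by
      have := h5 m hm1 hm2
      rwa [pvAny_getD s m (by omega)] at this⟩
  · rintro ⟨hn, h3, q, hq, h4, h5⟩
    refine ⟨List.length_pos_iff.mp (by omega), ?_, q, hq, ?_, fun m hm1 hm2 => ?_⟩
    · rwa [pvAny_getD s (s.length - 1) (by omega)]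
    · rwa [pvOptEq_getD p s q (by omega) hp]
    · rw [pvAny_getD s m (by omega)]
      exact h5 m hm1 hm2

-- the two inner loops compute the same stop position (shifted by i; A's is capped at length-1)
theorem pvStop_eq (s : List Char) (i : Nat) :
    ∀ fa k fb, i + k ≤ s.length - 1 → 1 ≤ s.length →
      s.length - 1 - (i + k) ≤ fa → s.length - (i + k) ≤ fb →
      pvStopA (s.drop i) k fa = min (pvFindB s (i + k) fb) (s.length - 1) - i := by
  intro fa
  induction fa with
  | zero =>
    intro k fb hk hn hfa hfb
    have hge := pvFindB_ge s (i + k) fb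
    simp only [pvStopA]
    omega
  | succ fa ih =>
    intro k fb hk hn hfa hfb
    by_cases hEnd : i + k = s.length - 1
    · have hge := pvFindB_ge s (i + k) fb
      rw [pvStopA, if_neg (by
        rintro ⟨-, h2⟩
        rw [List.length_drop] at h2
        omega)]
      omega
    · have hlt : i + k < s.length - 1 := by omega
      cases fb with
      | zero => omega
      | succ fb =>
        rw [pvStopA, pvFindB]
        by_cases hA : PySem.Chars.isalnum (s.getD (i + k) ' ') = true
        · rw [if_pos (by
            refine ⟨?_, ?_⟩
            · rw [pvGetD_drop]; exact hA
            · rw [List.length_drop]; omega),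
            if_pos ⟨by omega, hA⟩]
          exact ih (k + 1) fb (by omega) hn (by omega) (by omega)
        · rw [if_neg (by
            rintro ⟨h1, -⟩
            rw [pvGetD_drop] at h1
            exact hA h1),
            if_neg (by rintro ⟨-, h2⟩; exact hA h2)]
          omega

-- A on the suffix from i = B scanning from i (on Pre_, outside D_)
theorem pvMain (p s : List Char) (hPre : pvPreL p s) (hD : ¬ pvDL p s) :
    ∀ fa i fb, s.length - i ≤ fa → s.length - i ≤ fb →
      pvRunA p (s.drop i) fa = pvScanB p s i fb := by
  rw [pvPreL_iff] at hPre
  rw [pvDL_iff] at hD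
  intro fa
  induction fa with
  | zero =>
    intro i fb hfa hfb
    rw [List.drop_eq_nil_of_le (by omega), pvRunA_nil, pvScanB_ge p s i fb (by omega)]
  | succ fa ih =>
    intro i fb hfa hfb
    by_cases hi : i < s.length
    · -- head exists
      have hdrop : s.drop i = s[i] :: s.drop (i + 1) := List.drop_eq_getElem_cons hi
      cases fb with
      | zero => omega
      | succ fb =>
        rw [pvScanB, if_pos hi, List.getD_eq_getElem s ' ' hi]
        rw [hdrop, pvRunA, ← hdrop]
        by_cases hm : [s[i]] = p
        · -- a sign: extract a word
          have hp1 : p.length = 1 := by rw [← hm]; rfl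
          have hpc : p.getD 0 ' ' = s[i] := by rw [← hm]; rfl
          have hlast : ¬ s.getD (s.length - 1) ' ' = p.getD 0 ' ' := by
            intro h; exact hPre ⟨hp1, by omega, h⟩
          have hilt : i < s.length - 1 := by
            rcases Nat.lt_or_ge i (s.length - 1) with h | h
            · exact h
            · exfalso
              have hieq : i = s.length - 1 := by omega
              exact hlast (by rw [← hieq, List.getD_eq_getElem s ' ' hi, hpc])
          have hlen : (s.drop i).length = s.length - i := List.length_drop ..
          have hstop := pvStop_eq s i ((s.drop i).length) 1 s.length (by omega) (by omega)
            (by omega) (by omega)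
          set f := pvFindB s (i + 1) s.length with hf
          have hfge : i + 1 ≤ f := pvFindB_ge s (i + 1) s.length
          have hfle : f ≤ s.length := pvFindB_le s (i + 1) s.length (by omega)
          have hfne : f ≠ s.length - 1 := by
            intro hfeq
            apply hD
            refine ⟨hp1, by omega, ?_, i, hilt,
              by rw [List.getD_eq_getElem s ' ' hi, hpc], ?_⟩
            · have := pvFindB_not_alnum s (i + 1) s.length (by omega) (by omega)
              rwa [← hf, hfeq] at this
            · intro m hm1 hm2
              exact pvFindB_run s (i + 1) s.length m (by omega) (by omega)
          rw [if_pos hm, if_pos hm, hstop]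
          by_cases hfn : f = s.length
          · -- word runs to the end of the text
            have hmin : min f (s.length - 1) - i + 1 = (s.drop i).length := by
              rw [hlen]; omega
            rw [if_pos hmin]
            have hword : ((s.drop i).drop 1).take (min f (s.length - 1) - i)
                = (s.drop (i + 1)).take (f - (i + 1)) := by
              rw [List.drop_drop]
              congr 1
              omega
            have hrec : (s.drop i).drop (min f (s.length - 1) - i) = s.drop (s.length - 1) := by
              rw [List.drop_drop]
              congr 1
              omega
            rw [hword, hrec]
            congr 1
            · -- tails: A scans the final character and discards it; B is already done
              have hlast' : s.drop (s.length - 1) = s[s.length - 1]'(by omega) :: [] := by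
                rw [List.drop_eq_getElem_cons (by omega : s.length - 1 < s.length)]
                congr 1
                exact List.drop_eq_nil_of_le (by omega)
              cases fa with
              | zero => omega
              | succ fa =>
                rw [hlast', pvRunA, if_neg (by
                  intro hEq
                  apply hlast
                  rw [List.getD_eq_getElem s ' ' (by omega : s.length - 1 < s.length), hpc]
                  exact List.singleton_inj.mp (hEq.trans hm.symm)), pvRunA_nil]
                rw [hfn, pvScanB_ge p s s.length fb (by omega)]
          · -- word stops at a non-alphanumeric character strictly before the last position
            have hfl2 : f ≤ s.length - 2 := by omega
            have hmin : ¬ (min f (s.length - 1) - i + 1 = (s.drop i).length) := by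
              rw [hlen]; omega
            rw [if_neg hmin]
            have hword : ((s.drop i).drop 1).take (min f (s.length - 1) - i - 1)
                = (s.drop (i + 1)).take (f - (i + 1)) := by
              rw [List.drop_drop]
              congr 1
              omega
            have hrec : (s.drop i).drop (min f (s.length - 1) - i) = s.drop f := by
              rw [List.drop_drop]
              congr 1
              omega
            rw [hword, hrec]
            congr 1
            exact ih f fb (by omega) (by omega)
        · -- not a sign: advance by one character
          rw [if_neg hm, if_neg hm]
          exact ih (i + 1) fb (by omega) (by omega)
    · rw [List.drop_eq_nil_of_le (by omega), pvRunA_nil, pvScanB_ge p s i fb (by omega)]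

-- under D_ the outputs differ from every scan position i that still sees a sign position
theorem pvTight (p s : List Char) (hPre : pvPreL p s) (hp : p.length = 1)
    (hNA : PySem.Chars.isalnum (s.getD (s.length - 1) ' ') = false) :
    ∀ fa i fb, s.length - i ≤ fa → s.length - i ≤ fb →
      (∃ q, i ≤ q ∧ q < s.length - 1 ∧ s.getD q ' ' = p.getD 0 ' ' ∧
        ∀ m, m < s.length - 1 → q < m → PySem.Chars.isalnum (s.getD m ' ') = true) →
      pvRunA p (s.drop i) fa ≠ pvScanB p s i fb := by
  rw [pvPreL_iff] at hPre
  have hpform : p = [p.getD 0 ' '] := by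
    match p, hp with
    | [a], _ => rfl
  intro fa
  induction fa with
  | zero =>
    intro i fb hfa hfb ⟨q, hq0, hq1, _, _⟩
    omega
  | succ fa ih =>
    intro i fb hfa hfb hI
    obtain ⟨q, hq0, hq1, hq2, hq3⟩ := hI
    have hi : i < s.length := by omega
    have hdrop : s.drop i = s[i] :: s.drop (i + 1) := List.drop_eq_getElem_cons hi
    cases fb with
    | zero => omega
    | succ fb =>
      rw [pvScanB, if_pos hi, List.getD_eq_getElem s ' ' hi]
      rw [hdrop, pvRunA, ← hdrop]
      by_cases hm : [s[i]] = p
      · -- a sign at i: both extract a word here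
        have hpc : p.getD 0 ' ' = s[i] := by rw [← hm]; rfl
        have hilt : i < s.length - 1 := by omega
        have hlast : ¬ s.getD (s.length - 1) ' ' = p.getD 0 ' ' := by
          intro h; exact hPre ⟨hp, by omega, h⟩
        have hlen : (s.drop i).length = s.length - i := List.length_drop ..
        have hstop := pvStop_eq s i ((s.drop i).length) 1 s.length (by omega) (by omega)
          (by omega) (by omega)
        set f := pvFindB s (i + 1) s.length with hf
        have hfge : i + 1 ≤ f := pvFindB_ge s (i + 1) s.length
        have hfle : f ≤ s.length := pvFindB_le s (i + 1) s.length (by omega)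
        have hflt : f < s.length := by
          rcases Nat.lt_or_ge f s.length with h | h
          · exact h
          · exfalso
            have hfeq : f = s.length := by omega
            have := pvFindB_run s (i + 1) s.length (s.length - 1) (by omega) (by omega)
            rw [hNA] at this
            exact Bool.false_ne_true this
        have hfna := pvFindB_not_alnum s (i + 1) s.length (by omega) hflt
        rw [← hf] at hfna
        rw [if_pos hm, if_pos hm, hstop]
        by_cases hf1 : f = s.length - 1
        · -- the quirk fires here: A's word keeps the final character, B's does not
          have hmin : min f (s.length - 1) - i + 1 = (s.drop i).length := by
            rw [hlen]; omega
          rw [if_pos hmin]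
          intro hEq
          have hhead := congrArg (fun l => (l.headD []).length) hEq
          simp only [List.headD_cons, List.length_take, List.drop_drop, List.length_drop] at hhead
          omega
        · -- word stops strictly before the last position: same word, tails still differ
          have hfl2 : f ≤ s.length - 2 := by omega
          have hqf : f ≤ q := by
            by_contra hcon
            have := hq3 f (by omega) (by omega)
            rw [hfna] at this
            exact Bool.false_ne_true this
          have hmin : ¬ (min f (s.length - 1) - i + 1 = (s.drop i).length) := by
            rw [hlen]; omega
          rw [if_neg hmin]
          have hword : ((s.drop i).drop 1).take (min f (s.length - 1) - i - 1)
              = (s.drop (i + 1)).take (f - (i + 1)) := by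
            rw [List.drop_drop]
            congr 1
            omega
          have hrec : (s.drop i).drop (min f (s.length - 1) - i) = s.drop f := by
            rw [List.drop_drop]
            congr 1
            omega
          rw [hword, hrec]
          intro hEq
          injection hEq with h1 h2
          exact ih f fb (by omega) (by omega) ⟨q, hqf, hq1, hq2, hq3⟩ h2
      · -- no sign at i: both skip one character
        rw [if_neg hm, if_neg hm]
        have hqi : i < q := by
          rcases Nat.eq_or_lt_of_le hq0 with rfl | h
          · exfalso
            apply hm
            rw [List.getD_eq_getElem s ' ' hi] at hq2
            rw [hpform, hq2]
          · exact h
        exact ih (i + 1) fb (by omega) (by omega) ⟨q, by omega, hq1, hq2, hq3⟩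

-- ===== VERDICT (by name: the statement is the Claim_ definition above) =====
theorem izlociBesedoZPredznakom_spec : Claim_unchanged_izlociBesedoZPredznakom := by
  intro b p _ hPre hD
  unfold izlociBesedoZPredznakom izlociBesedoZPredznakom_alt
  have := pvMain p.toList b.toList hPre hD b.toList.length 0 b.toList.length (by omega) (by omega)
  simp only [List.drop_zero] at this
  exact congrArg _ this

theorem izlociBesedoZPredznakom_changed : Claim_changed_izlociBesedoZPredznakom := by
  unfold Claim_changed_izlociBesedoZPredznakom; decide

theorem izlociBesedoZPredznakom_tight : Claim_exact_izlociBesedoZPredznakom := by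
  intro b p _ hPre hD
  obtain ⟨hp, hn, hNA, q, hq1, hq2, hq3⟩ := (pvDL_iff p.toList b.toList).mp hD
  unfold izlociBesedoZPredznakom izlociBesedoZPredznakom_alt
  have hne := pvTight p.toList b.toList hPre hp hNA b.toList.length 0 b.toList.length
    (by omega) (by omega) ⟨q, Nat.zero_le q, hq1, hq2, fun m h1 h2 => hq3 m h1 h2⟩
  simp only [List.drop_zero] at hne
  intro hEq
  exact hne ((List.map_injective_iff.mpr (fun a b h => by
    simpa using congrArg String.toList h)) hEq)
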